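-- pv_equiv track=rewrite | github.com/HR-M2/specs | api-optimization/scripts/check_endpoint_sync.py | _get_module_from_path
-- ===== SOURCE A (Python) =====
-- def _get_module_from_path(path: str) -> str:
--     """根据路径推断模块名"""
--     path_module_mapping = {
--         '/positions/': 'positions',
--         '/library/': 'library',
--         '/screening/': 'screening',
--         '/videos/': 'videos',
--         '/recommend/': 'recommend',
--         '/interviews/': 'interviews',
--     }
--     for prefix, module in path_module_mapping.items():
--         if path.startswith(prefix):
--             return module
--     return ""
-- ===== SOURCE B (Python) =====
-- _MODULES = {'positions', 'library', 'screening', 'videos', 'recommend', 'interviews'}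
--
-- def _get_module_from_path(path: str) -> str:
--     if not path.startswith('/'):
--         return ''
--     end = path.find('/', 1)
--     if end == -1:
--         return ''
--     segment = path[1:end]
--     return segment if segment in _MODULES else ''
-- ===== Notes on version B (the rewrite author's own statement) =====
-- stated objective: simpler
-- what changed: Replaces A's loop over six slash-delimited module prefixes by extracting the first path segment once (find the second slash and slice) and testing that segment for membership in a set of the six module names.
import Mathlib
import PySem

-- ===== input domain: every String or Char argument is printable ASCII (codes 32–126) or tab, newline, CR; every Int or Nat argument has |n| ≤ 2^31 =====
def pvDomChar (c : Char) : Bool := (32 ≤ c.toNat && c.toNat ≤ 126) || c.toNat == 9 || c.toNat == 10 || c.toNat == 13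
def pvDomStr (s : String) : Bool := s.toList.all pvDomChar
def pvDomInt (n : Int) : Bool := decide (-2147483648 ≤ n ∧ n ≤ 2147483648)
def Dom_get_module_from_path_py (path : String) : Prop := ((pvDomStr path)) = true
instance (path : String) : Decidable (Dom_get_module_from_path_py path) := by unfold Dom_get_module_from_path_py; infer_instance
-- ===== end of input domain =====

-- B replaces A's loop over six path prefixes by extracting the first path segment once
-- (find the second '/' and slice) and testing it against a set of module names (objective: simpler).


-- ===== PORT A =====
def pvPathModuleMapping : PySem.Dict String String :=
  PySem.Dict.ofList [("/positions/", "positions"), ("/library/", "library"),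
    ("/screening/", "screening"), ("/videos/", "videos"),
    ("/recommend/", "recommend"), ("/interviews/", "interviews")]

def pvLoopA (path : String) : List (String × String) → String
  | [] => ""
  | (pfx, module) :: rest =>
    if PySem.Str.startswith path pfx then module else pvLoopA path rest

def get_module_from_path_py (path : String) : String :=
  pvLoopA path pvPathModuleMapping.items

-- ===== PORT B =====
def pvModules : PySem.Set String :=
  PySem.Set.ofList ["positions", "library", "screening", "videos", "recommend", "interviews"]

def get_module_from_path_py_alt (path : String) : String :=
  if ¬ PySem.Str.startswith path "/" then ""
  else
    let e := PySem.Str.findFrom path "/" 1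
    if e = -1 then ""
    else
      let seg := PySem.Str.slice path (some 1) (some e)
      if seg ∈ pvModules then seg else ""

-- ===== PRECONDITION & SPEC =====
def Spec_get_module_from_path_py (path : String) (out : String) : Prop := out = get_module_from_path_py_alt path
instance (path : String) (out : String) : Decidable (Spec_get_module_from_path_py path out) := by unfold Spec_get_module_from_path_py; infer_instance

-- ===== CLAIM (what is proved, stated in full; the proofs are below) =====
def Claim_equal_get_module_from_path_py : Prop := ∀ (path : String), Dom_get_module_from_path_py path → Spec_get_module_from_path_py path (get_module_from_path_py path)

-- ===== LEMMAS AND PROOFS =====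

-- the first '/' in u ++ '/' :: v, with u slash-free, is at index u.length
theorem pv_find_concat (u v : List Char) (hu : '/' ∉ u) :
    PySem.Chars.find (u ++ '/' :: v) ['/'] = (u.length : Int) := by
  have hocc : (0 : Int) ≤ PySem.Chars.find (u ++ '/' :: v) ['/'] := by
    rw [PySem.Chars.find_nonneg_iff]
    exact ⟨u, v, by simp⟩
  obtain ⟨hpre, hmin⟩ := PySem.Chars.find_spec hocc
  set n := (PySem.Chars.find (u ++ '/' :: v) ['/']).toNat with hn
  have : n = u.length := by
    rcases lt_trichotomy n u.length with hlt | heq | hgt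
    · exfalso
      rw [List.drop_append_of_le_length (le_of_lt hlt), List.drop_eq_getElem_cons hlt] at hpre
      obtain ⟨t, ht⟩ := hpre
      rw [List.singleton_append] at ht
      have : u[n] = '/' := (List.cons.injEq _ _ _ _ ▸ ht).1.symm
      exact hu (this ▸ List.getElem_mem _)
    · exact heq
    · exact absurd (hmin u.length hgt (by simp)) (by simp)
  omega

-- a six-prefix condition: '/w/' is a prefix of '/u/v' iff w = u (u, w slash-free)
theorem pv_pfx_iff (u v w : List Char) (hu : '/' ∉ u) (hw : '/' ∉ w) :
    ('/' :: (w ++ ['/']) <+: '/' :: (u ++ '/' :: v)) ↔ w = u := by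
  constructor
  · intro h
    rw [List.cons_prefix_cons] at h
    obtain ⟨t, ht⟩ := h.2
    rw [List.append_assoc, List.singleton_append] at ht
    have h1 := pv_find_concat w t hw
    have h2 := pv_find_concat u v hu
    rw [ht, h2] at h1
    have hlen : w.length = u.length := by exact_mod_cast h1.symm
    exact List.append_inj_left ht hlen
  · rintro rfl
    exact ⟨v, by simp⟩


theorem pv_ofList_eq_iff (u : List Char) (s : String) : String.ofList u = s ↔ u = s.toList :=
  ⟨fun h => by rw [← h, String.toList_ofList], fun h => by rw [h, String.ofList_toList]⟩

theorem pv_csw_false_of_nohead (cs w : List Char)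
    (hsw : PySem.Chars.startswith cs ['/'] = false) (hp : ['/'] <+: w) :
    PySem.Chars.startswith cs w = false := by
  rw [← Bool.not_eq_true, PySem.Chars.startswith_iff] at hsw ⊢
  exact fun h => hsw (hp.trans h)

theorem pv_noslash (tl w : List Char) (hf : PySem.Chars.find tl ['/'] = -1) (hw : '/' ∈ w) :
    ¬ ('/' :: w <+: '/' :: tl) := by
  intro h
  rw [List.cons_prefix_cons] at h
  rw [PySem.Chars.find_eq_neg_one_iff, List.singleton_infix_iff] at hf
  exact hf (h.2.subset hw)

theorem pv_csw_false_of_noslash (cs tl w : List Char) (htl : cs = '/' :: tl)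
    (hf : PySem.Chars.find tl ['/'] = -1) (hw : '/' ∈ w) :
    PySem.Chars.startswith cs ('/' :: w) = false := by
  rw [← Bool.not_eq_true, PySem.Chars.startswith_iff, htl]
  exact pv_noslash tl w hf hw

theorem pv_items : pvPathModuleMapping.items =
    [("/positions/", "positions"), ("/library/", "library"), ("/screening/", "screening"),
     ("/videos/", "videos"), ("/recommend/", "recommend"), ("/interviews/", "interviews")] := by
  decide

theorem pv_mods : pvModules =
    ["positions", "library", "screening", "videos", "recommend", "interviews"] := by decide

theorem pv_main (path : String) :
    get_module_from_path_py path = get_module_from_path_py_alt path := by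
  cases hsw : PySem.Str.startswith path "/" with
  | false =>
    have hswc : PySem.Chars.startswith path.toList ['/'] = false := by
      simpa [PySem.Str.startswith_eq] using hsw
    have hB : get_module_from_path_py_alt path = "" := by
      simp [get_module_from_path_py_alt, hswc]
    rw [hB]
    simp [get_module_from_path_py, pv_items, pvLoopA,
      pv_csw_false_of_nohead path.toList ['/', 'p', 'o', 's', 'i', 't', 'i', 'o', 'n', 's', '/'] hswc (by decide),
      pv_csw_false_of_nohead path.toList ['/', 'l', 'i', 'b', 'r', 'a', 'r', 'y', '/'] hswc (by decide),
      pv_csw_false_of_nohead path.toList ['/', 's', 'c', 'r', 'e', 'e', 'n', 'i', 'n', 'g', '/'] hswc (by decide),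
      pv_csw_false_of_nohead path.toList ['/', 'v', 'i', 'd', 'e', 'o', 's', '/'] hswc (by decide),
      pv_csw_false_of_nohead path.toList ['/', 'r', 'e', 'c', 'o', 'm', 'm', 'e', 'n', 'd', '/'] hswc (by decide),
      pv_csw_false_of_nohead path.toList ['/', 'i', 'n', 't', 'e', 'r', 'v', 'i', 'e', 'w', 's', '/'] hswc (by decide)]
  | true =>
    have hswc : PySem.Chars.startswith path.toList ['/'] = true := by
      simpa [PySem.Str.startswith_eq] using hsw
    have hpre1 : ['/'] <+: path.toList := (PySem.Chars.startswith_iff _ _).1 hswc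
    obtain ⟨tl, htl⟩ := hpre1
    rw [List.singleton_append] at htl
    have hlen1 : 1 ≤ path.toList.length := by rw [← htl]; simp
    have hdrop1 : List.drop 1 path.toList = tl := by rw [← htl]; rfl
    have he : PySem.Chars.findFrom path.toList ['/'] 1 =
        if PySem.Chars.find tl ['/'] = -1 then -1 else 1 + PySem.Chars.find tl ['/'] := by
      have h1 : (1 : Int) = ((1 : Nat) : Int) := rfl
      rw [h1, PySem.Chars.findFrom_natCast _ _ 1 hlen1, hdrop1]
      norm_num
    by_cases hf : PySem.Chars.find tl ['/'] = -1
    · have hB : get_module_from_path_py_alt path = "" := by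
        simp [get_module_from_path_py_alt, hswc, he, hf]
      rw [hB]
      simp [get_module_from_path_py, pv_items, pvLoopA,
        pv_csw_false_of_noslash path.toList tl ['p', 'o', 's', 'i', 't', 'i', 'o', 'n', 's', '/'] htl.symm hf (by decide),
        pv_csw_false_of_noslash path.toList tl ['l', 'i', 'b', 'r', 'a', 'r', 'y', '/'] htl.symm hf (by decide),
        pv_csw_false_of_noslash path.toList tl ['s', 'c', 'r', 'e', 'e', 'n', 'i', 'n', 'g', '/'] htl.symm hf (by decide),
        pv_csw_false_of_noslash path.toList tl ['v', 'i', 'd', 'e', 'o', 's', '/'] htl.symm hf (by decide),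
        pv_csw_false_of_noslash path.toList tl ['r', 'e', 'c', 'o', 'm', 'm', 'e', 'n', 'd', '/'] htl.symm hf (by decide),
        pv_csw_false_of_noslash path.toList tl ['i', 'n', 't', 'e', 'r', 'v', 'i', 'e', 'w', 's', '/'] htl.symm hf (by decide)]
    · have hpos : 0 ≤ PySem.Chars.find tl ['/'] := by
        have := PySem.Chars.neg_one_le_find tl ['/']
        omega
      obtain ⟨hpre, hmin⟩ := PySem.Chars.find_spec hpos
      set n := (PySem.Chars.find tl ['/']).toNat with hn
      obtain ⟨v, hv⟩ := hpre
      rw [List.singleton_append] at hv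
      have hnlt : n < tl.length := by
        by_contra hge
        rw [List.drop_of_length_le (by omega)] at hv
        simp at hv
      have htlu : tl = List.take n tl ++ '/' :: v := by
        conv_lhs => rw [← List.take_append_drop n tl]
        rw [← hv]
      set u := List.take n tl with hu_def
      have hulen : u.length = n := by
        rw [hu_def, List.length_take]
        omega
      have hu : '/' ∉ u := by
        intro hm
        obtain ⟨i, hi, hgi⟩ := List.getElem_of_mem hm
        have hin : i < n := by omega
        have hit : i < tl.length := by omega
        apply hmin i hin
        have htli : tl[i] = '/' := by
          simpa [hu_def, List.getElem_take] using hgi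
        rw [List.drop_eq_getElem_cons hit, htli]
        exact ⟨_, rfl⟩
      have hcs : path.toList = '/' :: (u ++ '/' :: v) := by
        rw [← htl]
        exact congrArg (List.cons '/') htlu
      have hfind : PySem.Chars.find tl ['/'] = (n : Int) := (Int.toNat_of_nonneg hpos).symm
      have hee : PySem.Chars.findFrom path.toList ['/'] 1 = 1 + (n : Int) := by
        rw [he, if_neg hf, hfind]
      have hne : ¬ ((1 : Int) + (n : Int) = -1) := by omega
      have hseg : PySem.Str.slice path (some 1) (some (1 + (n : Int))) = String.ofList u := by
        rw [← String.toList_inj]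
        have hbridge : (PySem.Str.slice path (some 1) (some (1 + (n : Int)))).toList =
            PySem.List.slice path.toList (some 1) (some (1 + (n : Int))) := by
          simp [PySem.Str.slice]
        rw [hbridge, String.toList_ofList]
        have h2 : (1 : Int) + (n : Int) = ((1 + n : Nat) : Int) := by push_cast; ring
        have h1 : (1 : Int) = ((1 : Nat) : Int) := rfl
        rw [h2, h1, PySem.List.slice_natCast, hcs]
        have h3 : 1 + n - 1 = n := by omega
        rw [h3, List.drop_one, List.tail_cons, ← hulen, List.take_left]
      have hBform : get_module_from_path_py_alt path =
          if String.ofList u ∈ pvModules then String.ofList u else "" := by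
        simp [get_module_from_path_py_alt, hswc, hee, hne, hseg]
      have hsw_positions : PySem.Chars.startswith path.toList ['/', 'p', 'o', 's', 'i', 't', 'i', 'o', 'n', 's', '/'] = decide (u = "positions".toList) := by
        rw [hcs]
        have hp : (['/', 'p', 'o', 's', 'i', 't', 'i', 'o', 'n', 's', '/'] : List Char) = '/' :: ("positions".toList ++ ['/']) := by decide
        rw [hp]
        by_cases hq : u = "positions".toList
        · rw [decide_eq_true hq]
          exact (PySem.Chars.startswith_iff _ _).2 ((pv_pfx_iff u v _ hu (by decide)).2 hq.symm)
        · simp only [hq, decide_false]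
          rw [← Bool.not_eq_true, PySem.Chars.startswith_iff]
          intro hc
          exact hq ((pv_pfx_iff u v _ hu (by decide)).1 hc).symm
      have hsw_library : PySem.Chars.startswith path.toList ['/', 'l', 'i', 'b', 'r', 'a', 'r', 'y', '/'] = decide (u = "library".toList) := by
        rw [hcs]
        have hp : (['/', 'l', 'i', 'b', 'r', 'a', 'r', 'y', '/'] : List Char) = '/' :: ("library".toList ++ ['/']) := by decide
        rw [hp]
        by_cases hq : u = "library".toList
        · rw [decide_eq_true hq]
          exact (PySem.Chars.startswith_iff _ _).2 ((pv_pfx_iff u v _ hu (by decide)).2 hq.symm)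
        · simp only [hq, decide_false]
          rw [← Bool.not_eq_true, PySem.Chars.startswith_iff]
          intro hc
          exact hq ((pv_pfx_iff u v _ hu (by decide)).1 hc).symm
      have hsw_screening : PySem.Chars.startswith path.toList ['/', 's', 'c', 'r', 'e', 'e', 'n', 'i', 'n', 'g', '/'] = decide (u = "screening".toList) := by
        rw [hcs]
        have hp : (['/', 's', 'c', 'r', 'e', 'e', 'n', 'i', 'n', 'g', '/'] : List Char) = '/' :: ("screening".toList ++ ['/']) := by decide
        rw [hp]
        by_cases hq : u = "screening".toList
        · rw [decide_eq_true hq]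
          exact (PySem.Chars.startswith_iff _ _).2 ((pv_pfx_iff u v _ hu (by decide)).2 hq.symm)
        · simp only [hq, decide_false]
          rw [← Bool.not_eq_true, PySem.Chars.startswith_iff]
          intro hc
          exact hq ((pv_pfx_iff u v _ hu (by decide)).1 hc).symm
      have hsw_videos : PySem.Chars.startswith path.toList ['/', 'v', 'i', 'd', 'e', 'o', 's', '/'] = decide (u = "videos".toList) := by
        rw [hcs]
        have hp : (['/', 'v', 'i', 'd', 'e', 'o', 's', '/'] : List Char) = '/' :: ("videos".toList ++ ['/']) := by decide
        rw [hp]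
        by_cases hq : u = "videos".toList
        · rw [decide_eq_true hq]
          exact (PySem.Chars.startswith_iff _ _).2 ((pv_pfx_iff u v _ hu (by decide)).2 hq.symm)
        · simp only [hq, decide_false]
          rw [← Bool.not_eq_true, PySem.Chars.startswith_iff]
          intro hc
          exact hq ((pv_pfx_iff u v _ hu (by decide)).1 hc).symm
      have hsw_recommend : PySem.Chars.startswith path.toList ['/', 'r', 'e', 'c', 'o', 'm', 'm', 'e', 'n', 'd', '/'] = decide (u = "recommend".toList) := by
        rw [hcs]
        have hp : (['/', 'r', 'e', 'c', 'o', 'm', 'm', 'e', 'n', 'd', '/'] : List Char) = '/' :: ("recommend".toList ++ ['/']) := by decide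
        rw [hp]
        by_cases hq : u = "recommend".toList
        · rw [decide_eq_true hq]
          exact (PySem.Chars.startswith_iff _ _).2 ((pv_pfx_iff u v _ hu (by decide)).2 hq.symm)
        · simp only [hq, decide_false]
          rw [← Bool.not_eq_true, PySem.Chars.startswith_iff]
          intro hc
          exact hq ((pv_pfx_iff u v _ hu (by decide)).1 hc).symm
      have hsw_interviews : PySem.Chars.startswith path.toList ['/', 'i', 'n', 't', 'e', 'r', 'v', 'i', 'e', 'w', 's', '/'] = decide (u = "interviews".toList) := by
        rw [hcs]
        have hp : (['/', 'i', 'n', 't', 'e', 'r', 'v', 'i', 'e', 'w', 's', '/'] : List Char) = '/' :: ("interviews".toList ++ ['/']) := by decide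
        rw [hp]
        by_cases hq : u = "interviews".toList
        · rw [decide_eq_true hq]
          exact (PySem.Chars.startswith_iff _ _).2 ((pv_pfx_iff u v _ hu (by decide)).2 hq.symm)
        · simp only [hq, decide_false]
          rw [← Bool.not_eq_true, PySem.Chars.startswith_iff]
          intro hc
          exact hq ((pv_pfx_iff u v _ hu (by decide)).1 hc).symm
      by_cases h1 : u = "positions".toList
      · have hA : get_module_from_path_py path = "positions" := by
          simp [get_module_from_path_py, pv_items, pvLoopA, hsw_positions, h1]
        have hB : get_module_from_path_py_alt path = "positions" := by
          rw [hBform, h1, String.ofList_toList]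
          decide
        rw [hA, hB]
      by_cases h2 : u = "library".toList
      · have hA : get_module_from_path_py path = "library" := by
          simp [get_module_from_path_py, pv_items, pvLoopA, hsw_positions, hsw_library, h2]
        have hB : get_module_from_path_py_alt path = "library" := by
          rw [hBform, h2, String.ofList_toList]
          decide
        rw [hA, hB]
      by_cases h3 : u = "screening".toList
      · have hA : get_module_from_path_py path = "screening" := by
          simp [get_module_from_path_py, pv_items, pvLoopA, hsw_positions, hsw_library, hsw_screening, h3]
        have hB : get_module_from_path_py_alt path = "screening" := by
          rw [hBform, h3, String.ofList_toList]
          decide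
        rw [hA, hB]
      by_cases h4 : u = "videos".toList
      · have hA : get_module_from_path_py path = "videos" := by
          simp [get_module_from_path_py, pv_items, pvLoopA, hsw_positions, hsw_library, hsw_screening, hsw_videos, h4]
        have hB : get_module_from_path_py_alt path = "videos" := by
          rw [hBform, h4, String.ofList_toList]
          decide
        rw [hA, hB]
      by_cases h5 : u = "recommend".toList
      · have hA : get_module_from_path_py path = "recommend" := by
          simp [get_module_from_path_py, pv_items, pvLoopA, hsw_positions, hsw_library, hsw_screening, hsw_videos, hsw_recommend, h5]
        have hB : get_module_from_path_py_alt path = "recommend" := by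
          rw [hBform, h5, String.ofList_toList]
          decide
        rw [hA, hB]
      by_cases h6 : u = "interviews".toList
      · have hA : get_module_from_path_py path = "interviews" := by
          simp [get_module_from_path_py, pv_items, pvLoopA, hsw_positions, hsw_library, hsw_screening, hsw_videos, hsw_recommend, hsw_interviews, h6]
        have hB : get_module_from_path_py_alt path = "interviews" := by
          rw [hBform, h6, String.ofList_toList]
          decide
        rw [hA, hB]
      have h1' : ¬ u = ['p', 'o', 's', 'i', 't', 'i', 'o', 'n', 's'] := fun h => h1 (h.trans (by decide))
      have h2' : ¬ u = ['l', 'i', 'b', 'r', 'a', 'r', 'y'] := fun h => h2 (h.trans (by decide))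
      have h3' : ¬ u = ['s', 'c', 'r', 'e', 'e', 'n', 'i', 'n', 'g'] := fun h => h3 (h.trans (by decide))
      have h4' : ¬ u = ['v', 'i', 'd', 'e', 'o', 's'] := fun h => h4 (h.trans (by decide))
      have h5' : ¬ u = ['r', 'e', 'c', 'o', 'm', 'm', 'e', 'n', 'd'] := fun h => h5 (h.trans (by decide))
      have h6' : ¬ u = ['i', 'n', 't', 'e', 'r', 'v', 'i', 'e', 'w', 's'] := fun h => h6 (h.trans (by decide))
      have hA : get_module_from_path_py path = "" := by
        simp [get_module_from_path_py, pv_items, pvLoopA, hsw_positions, hsw_library,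
          hsw_screening, hsw_videos, hsw_recommend, hsw_interviews,
          h1', h2', h3', h4', h5', h6']
      have hB : get_module_from_path_py_alt path = "" := by
        rw [hBform, if_neg]
        rw [pv_mods]
        intro hm
        simp only [List.mem_cons, List.not_mem_nil, or_false] at hm
        rcases hm with hm | hm | hm | hm | hm | hm
        · exact h1 ((pv_ofList_eq_iff u _).1 hm)
        · exact h2 ((pv_ofList_eq_iff u _).1 hm)
        · exact h3 ((pv_ofList_eq_iff u _).1 hm)
        · exact h4 ((pv_ofList_eq_iff u _).1 hm)
        · exact h5 ((pv_ofList_eq_iff u _).1 hm)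
        · exact h6 ((pv_ofList_eq_iff u _).1 hm)
      rw [hA, hB]

-- ===== VERDICT (by name: the statement is the Claim_ definition above) =====
theorem get_module_from_path_py_spec : Claim_equal_get_module_from_path_py := by
  intro path _
  unfold Spec_get_module_from_path_py
  exact pv_main path
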